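-- pv_equiv track=rewrite | github.com/yuvika022/100DaysOfCode-2025 | DSA/Sandeep_Jha_590014310/week1/day5/q1.py | unique_elem
-- ===== SOURCE A (Python) =====
-- def unique_elem(nums):
--     freq_counter = {}
--     unique = 0
--     for n in nums:
--         freq_counter[n] = freq_counter.get(n,0) + 1
--
--     for n,k in freq_counter.items():
--         if k == 1:
--             unique = n
--
--     return unique
-- ===== SOURCE B (Python) =====
-- def unique_elem(nums):
--     seen = set()
--     dup = set()
--     for n in nums:
--         if n in seen:
--             dup.add(n)
--         else:
--             seen.add(n)
--     for n in reversed(nums):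
--         if n not in dup:
--             return n
--     return 0
-- ===== Notes on version B (the rewrite author's own statement) =====
-- stated objective: alternative
-- what changed: Replaces A's frequency dict and full scan over dict items with two sets (seen/duplicated) and an early-returning scan over reversed(nums): the last element whose count is 1 is the first non-duplicated element from the end.
import Mathlib
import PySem

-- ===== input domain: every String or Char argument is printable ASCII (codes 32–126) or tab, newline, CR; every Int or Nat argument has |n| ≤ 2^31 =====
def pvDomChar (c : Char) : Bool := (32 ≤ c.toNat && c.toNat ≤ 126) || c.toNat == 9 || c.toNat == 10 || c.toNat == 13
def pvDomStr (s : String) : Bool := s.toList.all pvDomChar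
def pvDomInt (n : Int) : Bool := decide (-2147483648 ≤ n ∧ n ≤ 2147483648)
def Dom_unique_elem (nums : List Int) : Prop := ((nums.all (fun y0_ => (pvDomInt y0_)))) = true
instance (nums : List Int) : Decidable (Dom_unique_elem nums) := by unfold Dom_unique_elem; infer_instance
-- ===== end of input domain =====

-- B replaces A's frequency dict + full scan over the dict items by two sets (seen/dup) and an
-- early-returning scan over reversed(nums); same cost, alternative structure.

-- ===== PORT A =====
def unique_elem (nums : List Int) : Int :=
  let freq_counter := nums.foldl (fun d n => d.insert n (d.getD n 0 + 1))
    (PySem.Dict.empty : PySem.Dict Int Int)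
  freq_counter.items.foldl (fun unique p => if p.2 == 1 then p.1 else unique) 0

-- ===== PORT B =====
-- the second loop of Source B: 'for n in reversed(nums): if n not in dup: return n' / 'return 0'
def uniqueAltScan (dup : PySem.Set Int) : List Int → Int
  | [] => 0
  | n :: rest => if PySem.Set.contains dup n then uniqueAltScan dup rest else n

def unique_elem_alt (nums : List Int) : Int :=
  let sd := nums.foldl
    (fun sd n => if PySem.Set.contains sd.1 n then (sd.1, PySem.Set.add sd.2 n)
                 else (PySem.Set.add sd.1 n, sd.2))
    ((PySem.Set.empty, PySem.Set.empty) : PySem.Set Int × PySem.Set Int)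
  uniqueAltScan sd.2 nums.reverse

-- ===== PRECONDITION & SPEC =====
def Spec_unique_elem (nums : List Int) (out : Int) : Prop := out = unique_elem_alt nums
instance (nums : List Int) (out : Int) : Decidable (Spec_unique_elem nums out) := by unfold Spec_unique_elem; infer_instance

-- ===== CLAIM (what is proved, stated in full; the proofs are below) =====
def Claim_equal_unique_elem : Prop := ∀ (nums : List Int), Dom_unique_elem nums → Spec_unique_elem nums (unique_elem nums)

-- ===== LEMMAS AND PROOFS =====

-- A's second loop keeps the LAST key whose stored count is 1.
theorem foldl_lastif (l : List Int) (p : Int → Bool) : ∀ init,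
    l.foldl (fun u k => if p k then k else u) init = ((l.filter p).getLast?).getD init := by
  induction l with
  | nil => intro init; simp
  | cons a l ih =>
    intro init
    by_cases hp : p a = true
    · simp only [List.foldl_cons, List.filter_cons, hp, if_true, ih]
      cases h : List.filter p l with
      | nil => simp
      | cons b t =>
        rw [List.getLast?_cons_cons]
        obtain ⟨v, hv⟩ := Option.isSome_iff_exists.mp
          (show (b :: t).getLast?.isSome = true by simp)
        rw [hv]
        rfl
    · simp [List.foldl_cons, hp, ih]

-- B's second loop is find? over the reversed list (with default 0).
theorem scan_eq_find? (d : PySem.Set Int) : ∀ l : List Int,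
    uniqueAltScan d l = ((l.find? (fun n => !PySem.Set.contains d n)).getD 0) := by
  intro l
  induction l with
  | nil => simp [uniqueAltScan]
  | cons n rest ih =>
    by_cases hc : n ∈ d <;>
      simp [uniqueAltScan, hc, ih]

theorem find?_congr_mem (l : List Int) (p q : Int → Bool)
    (h : ∀ x ∈ l, p x = q x) : l.find? p = l.find? q := by
  induction l with
  | nil => rfl
  | cons a t ih =>
    have ha := h a (List.mem_cons_self ..)
    simp only [List.find?_cons, ha]
    cases q a
    · exact ih (fun x hx => h x (List.mem_cons_of_mem _ hx))
    · rfl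

theorem find?_reverse_getLast (l : List Int) (p : Int → Bool) :
    l.reverse.find? p = (l.filter p).getLast? := by
  rw [← List.head?_filter, List.filter_reverse, List.head?_reverse]

-- invariant of Source B's first loop: dup holds exactly the elements seen at least twice
theorem sd_inv : ∀ (l a : List Int) (s d : PySem.Set Int),
    (∀ x, x ∈ s ↔ 1 ≤ a.count x) → (∀ x, x ∈ d ↔ 2 ≤ a.count x) →
    ∀ x, (x ∈ (l.foldl
        (fun sd n => if PySem.Set.contains sd.1 n then (sd.1, PySem.Set.add sd.2 n)
                     else (PySem.Set.add sd.1 n, sd.2)) (s, d)).2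
      ↔ 2 ≤ (a ++ l).count x) := by
  intro l
  induction l with
  | nil => intro a s d hs hd x; simpa using hd x
  | cons n rest ih =>
    intro a s d hs hd x
    have hceq : (a ++ [n]).count n = a.count n + 1 := by simp
    have hcne : ∀ y : Int, n ≠ y → (a ++ [n]).count y = a.count y := by
      intro y h; simp [List.count_append, h]
    have hfin : ∀ y : Int, ((a ++ [n]) ++ rest).count y = (a ++ n :: rest).count y := by
      intro y; by_cases h : y = n <;> simp [List.count_append, List.count_cons, h]
    by_cases hc : PySem.Set.contains s n = true
    · have hmem : n ∈ s := (PySem.Set.contains_iff s n).mp hc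
      have hn1 : 1 ≤ a.count n := (hs n).mp hmem
      simp only [List.foldl_cons, hc, if_true]
      have := ih (a ++ [n]) s (PySem.Set.add d n)
        (by intro y
            by_cases hyn : n = y
            · subst hyn; rw [hceq]
              exact ⟨fun _ => by omega, fun _ => hmem⟩
            · rw [hcne y hyn]; exact hs y)
        (by intro y; rw [PySem.Set.mem_add]
            by_cases hyn : n = y
            · subst hyn; rw [hceq]
              exact ⟨fun _ => by omega, fun _ => Or.inr rfl⟩
            · rw [hcne y hyn]
              constructor
              · rintro (hy | rfl)
                · exact (hd y).mp hy
                · exact absurd rfl hyn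
              · intro h2; exact Or.inl ((hd y).mpr h2)) x
      rw [hfin x] at this
      exact this
    · have hmem : n ∉ s := fun hn => hc ((PySem.Set.contains_iff s n).mpr hn)
      have hn0 : a.count n = 0 := by
        by_contra h
        exact hmem ((hs n).mpr (by omega))
      simp only [List.foldl_cons, hc]
      have := ih (a ++ [n]) (PySem.Set.add s n) d
        (by intro y; rw [PySem.Set.mem_add]
            by_cases hyn : n = y
            · subst hyn; rw [hceq]
              exact ⟨fun _ => by omega, fun _ => Or.inr rfl⟩
            · rw [hcne y hyn]
              constructor
              · rintro (hy | rfl)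
                · exact (hs y).mp hy
                · exact absurd rfl hyn
              · intro h1; exact Or.inl ((hs y).mpr h1))
        (by intro y
            by_cases hyn : n = y
            · subst hyn; rw [hceq]
              exact ⟨fun hy => by have := (hd n).mp hy; omega, fun h2 => by omega⟩
            · rw [hcne y hyn]; exact hd y) x
      rw [hfin x] at this
      exact this

-- filtering by a predicate true only on elements of joint count ≤ 1 commutes with Set.add-folding
theorem filter_foldl_add : ∀ (l s : List Int) (p : Int → Bool),
    (∀ x, p x = true → s.count x + l.count x ≤ 1) →
    (l.foldl PySem.Set.add s).filter p = s.filter p ++ l.filter p := by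
  intro l
  induction l with
  | nil => intro s p _; simp
  | cons a l ih =>
    intro s p h
    by_cases hc : PySem.Set.contains s a = true
    · have hmem : a ∈ s := (PySem.Set.contains_iff s a).mp hc
      have hs1 : 1 ≤ s.count a := List.count_pos_iff.mpr hmem
      have hpa : p a = false := by
        by_contra hp
        have := h a (by simpa using hp)
        simp at this
        omega
      have hadd : PySem.Set.add s a = s := by simp [PySem.Set.add, hmem]
      rw [List.foldl_cons, hadd, ih s p
        (by intro x hx
            have := h x hx
            simp [List.count_cons] at this ⊢
            omega)]
      simp [hpa]
    · have hmem : a ∉ s := fun hm => hc ((PySem.Set.contains_iff s a).mpr hm)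
      have hadd : PySem.Set.add s a = s ++ [a] := by simp [PySem.Set.add, hmem]
      rw [List.foldl_cons, hadd, ih (s ++ [a]) p
        (by intro x hx
            have := h x hx
            simp [List.count_append, List.count_cons] at this ⊢
            omega)]
      simp only [List.filter_append, List.filter_cons, List.filter_nil]
      cases hpa : p a <;> simp

-- ===== VERDICT (by name: the statement is the Claim_ definition above) =====
theorem unique_elem_spec : Claim_equal_unique_elem := by
  intro nums _
  unfold Spec_unique_elem
  have hq1 : ∀ x : Int, (nums.count x == 1) = true → nums.count x = 1 := by
    intro x hx; simpa using hx
  -- A computes the last element of filter (count = 1) nums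
  have hA : unique_elem nums = ((nums.filter (fun k => nums.count k == 1)).getLast?).getD 0 := by
    show ((PySem.Dict.counter nums).items.foldl
      (fun unique p => if p.2 == 1 then p.1 else unique) 0) = _
    rw [PySem.Dict.items_counter, List.foldl_map]
    simp only []
    have hpq : (fun (u : Int) (k : Int) => if ((nums.count k : Int) == 1) = true then k else u)
        = (fun (u : Int) (k : Int) => if (nums.count k == 1) = true then k else u) := by
      funext u k
      by_cases h : nums.count k = 1
      · simp [h]
      · have h' : ((nums.count k : Int)) ≠ 1 := by exact_mod_cast h
        simp [h, h']
    rw [show ((PySem.Set.ofList nums).foldl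
          (fun unique k => if ((k, (nums.count k : Int)).2 == 1) = true
            then (k, (nums.count k : Int)).1 else unique) 0)
        = ((PySem.Set.ofList nums).foldl
          (fun u k => if (nums.count k == 1) = true then k else u) 0) from by rw [← hpq]]
    rw [foldl_lastif (PySem.Set.ofList nums) (fun k => nums.count k == 1) 0]
    rw [PySem.Set.ofList_eq_foldl,
        filter_foldl_add nums [] (fun k => nums.count k == 1)
          (by intro x hx; have := hq1 x hx; simpa using this.le)]
    simp
  -- B computes the same
  have key : ∀ (dupd : PySem.Set Int), (∀ x, x ∈ dupd ↔ 2 ≤ nums.count x) →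
      uniqueAltScan dupd nums.reverse
        = ((nums.filter (fun k => nums.count k == 1)).getLast?).getD 0 := by
    intro dupd hdup
    rw [scan_eq_find?]
    rw [find?_congr_mem nums.reverse _ (fun k => nums.count k == 1)
      (by intro x hx
          have hxm : x ∈ nums := List.mem_reverse.mp hx
          have hge : 1 ≤ nums.count x := List.count_pos_iff.mpr hxm
          by_cases h2 : 2 ≤ nums.count x
          · have hcx : PySem.Set.contains dupd x = true :=
              (PySem.Set.contains_iff dupd x).mpr ((hdup x).mpr h2)
            rw [hcx]
            have hne : nums.count x ≠ 1 := by omega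
            simp [hne]
          · have hcx : PySem.Set.contains dupd x = false := by
              rw [← Bool.not_eq_true, PySem.Set.contains_iff]
              intro hmem
              exact h2 ((hdup x).mp hmem)
            rw [hcx]
            have h1 : nums.count x = 1 := by omega
            simp [h1])]
    rw [find?_reverse_getLast]
  have hB : unique_elem_alt nums
      = ((nums.filter (fun k => nums.count k == 1)).getLast?).getD 0 := by
    show uniqueAltScan (nums.foldl
        (fun sd n => if PySem.Set.contains sd.1 n then (sd.1, PySem.Set.add sd.2 n)
                     else (PySem.Set.add sd.1 n, sd.2))
        ((PySem.Set.empty, PySem.Set.empty) : PySem.Set Int × PySem.Set Int)).2 nums.reverse = _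
    exact key _ (by
      have := sd_inv nums [] PySem.Set.empty PySem.Set.empty
        (by intro x; simp [PySem.Set.empty]) (by intro x; simp [PySem.Set.empty])
      simpa using this)
  rw [hA, hB]
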